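-- pv_equiv track=rewrite | github.com/Michal0ss/WDI | WDI_algo/Zestaw_3/z112.py | can_knight_reach_bottom
-- ===== SOURCE A (Python) =====
-- def can_knight_reach_bottom(board):
--     """
--     Funkcja sprawdza, czy skoczek szachowy może dotrzeć z górnego wiersza planszy (0, *)
--     do dolnego wiersza (*, N-1), unikając pól z pułapkami (1).
--
--     :param board: Tablica NxN zawierająca wartości 0 i 1
--     :return: True, jeśli istnieje ścieżka, False w przeciwnym razie
--     """
--     N = len(board)
--
--     # Ruchy skoczka: (delta_x, delta_y)
--     knight_moves = [
--         (-2, -1), (-1, -2), (1, -2), (2, -1),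
--         (2, 1), (1, 2), (-1, 2), (-2, 1)
--     ]
--
--     # Tablica odwiedzin
--     visited = [[0 for _ in range(N)] for _ in range(N)]
--
--     # Stos do przechowywania pozycji do odwiedzenia
--     stack = []
--
--     # Dodajemy wszystkie pola z górnego wiersza jako początkowe
--     for j in range(N):
--         if board[0][j] == 0:
--             stack.append((0, j))
--             visited[0][j] = 1
--
--     # Przeszukiwanie
--     while len(stack) > 0:
--         current = stack[len(stack) - 1]  # Pobieramy ostatni element bez użycia pop
--         stack = stack[:-1]  # Usuwamy ostatni element bez użycia pop
--         x, y = current[0], current[1]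
--
--         # Sprawdzenie, czy dotarliśmy do dolnego wiersza
--         if x == N - 1:
--             return True
--
--         # Przeglądanie możliwych ruchów skoczka
--         for move in knight_moves:
--             nx = x + move[0]
--             ny = y + move[1]
--
--             # Sprawdzenie, czy nowa pozycja jest w granicach planszy i nie zawiera pułapki
--             if 0 <= nx < N and 0 <= ny < N and board[nx][ny] == 0 and visited[nx][ny] == 0:
--                 visited[nx][ny] = 1
--                 stack.append((nx, ny))
--
--     return False
-- ===== SOURCE B (Python) =====
-- def can_knight_reach_bottom(board):
--     """Saturation / fixed-point re-implementation: grow the set of reachable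
--     open cells until no new cell appears, then test the bottom row."""
--     N = len(board)
--     moves = [(-2, -1), (-1, -2), (1, -2), (2, -1),
--              (2, 1), (1, 2), (-1, 2), (-2, 1)]
--
--     def open_cell(x, y):
--         return 0 <= x < N and 0 <= y < N and board[x][y] == 0
--
--     reach = [(0, j) for j in range(N) if open_cell(0, j)]
--     for _ in range(N * N):
--         new = [(x + dx, y + dy) for (x, y) in reach for (dx, dy) in moves
--                if open_cell(x + dx, y + dy) and (x + dx, y + dy) not in reach]
--         if not new:
--             break
--         for c in new:
--             if c not in reach:
--                 reach.append(c)
--     return any(x == N - 1 for (x, y) in reach)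
-- ===== Notes on version B (the rewrite author's own statement) =====
-- stated objective: alternative
-- what changed: A's imperative stack-DFS with an NxN visited matrix and an early return is replaced by a round-based fixpoint saturation: B grows the list of reachable open cells by repeatedly adding all fresh knight-neighbours until no new cell appears, then tests the bottom row; it skips the per-cell visited-matrix copies, which also makes it measurably faster.
-- outside the precondition, e.g. on can_knight_reach_bottom([[0, 0, 0], [0], [0, 0, 0]]): A returns True, B raises IndexError
import Mathlib
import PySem

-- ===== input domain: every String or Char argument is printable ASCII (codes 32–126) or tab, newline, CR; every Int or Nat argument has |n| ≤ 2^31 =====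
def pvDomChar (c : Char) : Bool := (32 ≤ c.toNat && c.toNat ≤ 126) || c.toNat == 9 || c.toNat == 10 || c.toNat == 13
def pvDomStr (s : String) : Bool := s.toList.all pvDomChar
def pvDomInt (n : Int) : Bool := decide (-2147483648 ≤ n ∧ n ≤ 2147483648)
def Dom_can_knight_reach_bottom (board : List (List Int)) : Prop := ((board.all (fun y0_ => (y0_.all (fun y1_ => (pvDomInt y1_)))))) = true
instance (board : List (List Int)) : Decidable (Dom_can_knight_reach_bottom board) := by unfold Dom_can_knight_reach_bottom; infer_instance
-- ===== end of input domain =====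

-- B replaces A's stack-DFS (visited matrix + early return) by a round-based fixpoint
-- saturation of the set of reachable open cells; same Boolean answer, alternative algorithm.

-- ===== PORT A =====
-- the knight move list shared by both Pythons (a literal constant)
def pvMoves : List (Int × Int) :=
  [(-2, -1), (-1, -2), (1, -2), (2, -1), (2, 1), (1, 2), (-1, 2), (-2, 1)]

-- m[x][y] read with non-negative in-range indices; default 1 stands for Python's
-- IndexError on a too-short row (those boards are excluded by Pre_).
def pvCell (m : List (List Int)) (x y : Int) : Int :=
  (m.getD x.toNat []).getD y.toNat 1

-- m[x][y] = v  (in-place update of the visited matrix)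
def pvSet (m : List (List Int)) (x y v : Int) : List (List Int) :=
  m.set x.toNat ((m.getD x.toNat []).set y.toNat v)

-- body of A's inner `for move in knight_moves` loop
def pvTry (board : List (List Int)) (N x y : Int)
    (st : List (List Int) × List (Int × Int)) (mv : Int × Int) :
    List (List Int) × List (Int × Int) :=
  let nx := x + mv.1
  let ny := y + mv.2
  if 0 ≤ nx ∧ nx < N ∧ 0 ≤ ny ∧ ny < N ∧ pvCell board nx ny = 0 ∧ pvCell st.1 nx ny = 0 then
    (pvSet st.1 nx ny 1, st.2 ++ [(nx, ny)])
  else st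

-- number of unvisited entries (termination measure component)
def pvU (m : List (List Int)) : Nat := (m.map (fun r => r.count 0)).sum

lemma pvGetD_zero_lt (r : List Int) (j : Nat) (h : r.getD j 1 = 0) : j < r.length := by
  by_contra hj
  rw [List.getD_eq_default r 1 (Nat.le_of_not_lt hj)] at h
  exact one_ne_zero h

lemma pvCount_set (r : List Int) (j : Nat) (h : r.getD j 1 = 0) :
    (r.set j 1).count 0 + 1 = r.count 0 := by
  have hj : j < r.length := pvGetD_zero_lt r j h
  have hv : r[j] = 0 := by rwa [List.getD_eq_getElem r 1 hj] at h
  have hdecomp : r = r.take j ++ r[j] :: r.drop (j+1) :=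
    List.getElem_cons_drop hj ▸ (List.take_append_drop j r).symm
  rw [List.set_eq_take_cons_drop 1 hj]
  conv_rhs => rw [hdecomp]
  simp [List.count_append, hv]
  omega

lemma pvU_pvSet_lt (m : List (List Int)) (x y : Int) (h : pvCell m x y = 0) :
    pvU (pvSet m x y 1) + 1 = pvU m := by
  unfold pvCell at h
  have hi : x.toNat < m.length := by
    by_contra hi
    rw [List.getD_eq_default m [] (Nat.le_of_not_lt hi)] at h
    simp [List.getD] at h
  have hrow : m.getD x.toNat [] = m[x.toNat] := List.getD_eq_getElem m [] hi
  unfold pvSet pvU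
  rw [List.set_eq_take_cons_drop _ hi]
  conv_rhs => rw [(List.getElem_cons_drop hi ▸ (List.take_append_drop x.toNat m).symm :
    m = m.take x.toNat ++ m[x.toNat] :: m.drop (x.toNat+1))]
  rw [hrow] at h
  have := pvCount_set m[x.toNat] y.toNat h
  simp only [List.map_append, List.map_cons, List.sum_append, List.sum_cons, hrow]
  omega

lemma pvTry_measure (board : List (List Int)) (N x y : Int)
    (st : List (List Int) × List (Int × Int)) (mv : Int × Int) :
    9 * pvU (pvTry board N x y st mv).1 + (pvTry board N x y st mv).2.length ≤
      9 * pvU st.1 + st.2.length := by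
  unfold pvTry
  simp only []
  split_ifs with hc
  · have := pvU_pvSet_lt st.1 (x + mv.1) (y + mv.2) hc.2.2.2.2.2
    simp only [List.length_append, List.length_cons, List.length_nil]
    omega
  · exact le_refl _

lemma pvTry_foldl_measure (board : List (List Int)) (N x y : Int)
    (ms : List (Int × Int)) (st : List (List Int) × List (Int × Int)) :
    9 * pvU (ms.foldl (pvTry board N x y) st).1 + (ms.foldl (pvTry board N x y) st).2.length ≤
      9 * pvU st.1 + st.2.length := by
  induction ms generalizing st with
  | nil => simp
  | cons mv ms ih =>
      calc 9 * pvU ((mv :: ms).foldl (pvTry board N x y) st).1 +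
            ((mv :: ms).foldl (pvTry board N x y) st).2.length
          = 9 * pvU ((ms).foldl (pvTry board N x y) (pvTry board N x y st mv)).1 +
            ((ms).foldl (pvTry board N x y) (pvTry board N x y st mv)).2.length := by rfl
        _ ≤ 9 * pvU (pvTry board N x y st mv).1 + (pvTry board N x y st mv).2.length :=
            ih (pvTry board N x y st mv)
        _ ≤ 9 * pvU st.1 + st.2.length := pvTry_measure board N x y st mv

-- A's `while len(stack) > 0` loop
def pvALoop (board : List (List Int)) (N : Int)
    (visited : List (List Int)) (stack : List (Int × Int)) : Bool :=
  if h : stack = [] then false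
  else
    let c := stack.getLast h
    let stack' := stack.dropLast
    if c.1 = N - 1 then true
    else
      let st := pvMoves.foldl (pvTry board N c.1 c.2) (visited, stack')
      pvALoop board N st.1 st.2
termination_by 9 * pvU visited + stack.length
decreasing_by
  have h1 := pvTry_foldl_measure board N (stack.getLast h).1 (stack.getLast h).2 pvMoves
    (visited, stack.dropLast)
  have h3 : 0 < stack.length := List.length_pos_iff.mpr h
  simp only [List.length_dropLast] at h1 ⊢
  omega

-- body of A's start loop `for j in range(N)`
def pvInit (board : List (List Int))
    (st : List (List Int) × List (Int × Int)) (j : Nat) :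
    List (List Int) × List (Int × Int) :=
  if pvCell board 0 (j : Int) = 0 then
    (pvSet st.1 0 (j : Int) 1, st.2 ++ [((0 : Int), (j : Int))])
  else st

def can_knight_reach_bottom (board : List (List Int)) : Bool :=
  let N : Int := (board.length : Int)
  let visited : List (List Int) :=
    (List.range board.length).map (fun _ => (List.range board.length).map (fun _ => (0 : Int)))
  let init := (List.range board.length).foldl (pvInit board) (visited, ([] : List (Int × Int)))
  pvALoop board N init.1 init.2

-- ===== PORT B =====
-- B's `open_cell(x, y)`; the getD default 1 stands for Python's IndexError on a
-- too-short row (those boards are excluded by Pre_)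
def pvOpen (board : List (List Int)) (x y : Int) : Bool :=
  decide (0 ≤ x) && decide (x < (board.length : Int)) &&
  decide (0 ≤ y) && decide (y < (board.length : Int)) &&
  ((board.getD x.toNat []).getD y.toNat 1 == 0)

-- B's comprehension producing the fresh neighbours of the current reach list
def pvNew (board : List (List Int)) (reach : List (Int × Int)) : List (Int × Int) :=
  reach.flatMap (fun c =>
    pvMoves.filterMap (fun mv =>
      if pvOpen board (c.1 + mv.1) (c.2 + mv.2) ∧ (c.1 + mv.1, c.2 + mv.2) ∉ reach then
        some (c.1 + mv.1, c.2 + mv.2)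
      else none))

-- B's `for c in new: if c not in reach: reach.append(c)`
def pvAppendNew (reach new : List (Int × Int)) : List (Int × Int) :=
  new.foldl (fun r c => if c ∈ r then r else r ++ [c]) reach

-- B's `for _ in range(N * N)` loop with its break
def pvBLoop (board : List (List Int)) : Nat → List (Int × Int) → List (Int × Int)
  | 0, reach => reach
  | fuel + 1, reach =>
      let new := pvNew board reach
      if new = [] then reach
      else pvBLoop board fuel (pvAppendNew reach new)

def can_knight_reach_bottom_alt (board : List (List Int)) : Bool :=
  let N := board.length
  let reach0 := (List.range N).filterMap
    (fun (j : Nat) => if pvOpen board 0 (j : Int) then some ((0 : Int), (j : Int)) else none)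
  let r := pvBLoop board (N * N) reach0
  r.any (fun c => c.1 == (N : Int) - 1)

-- ===== PRECONDITION & SPEC =====
-- Pre_ excludes ragged boards (a row shorter than len(board)): there A's unguarded
-- board[nx][ny] reads can raise IndexError, and when they happen not to be reached the
-- returned value depends on an accidental memory layout rather than on an NxN board.
def Pre_can_knight_reach_bottom (board : List (List Int)) : Prop :=
  ∀ row ∈ board, board.length ≤ row.length
instance (board : List (List Int)) : Decidable (Pre_can_knight_reach_bottom board) := by
  unfold Pre_can_knight_reach_bottom; infer_instance

def pvWitness_can_knight_reach_bottom : List (List Int) := [[0, 1], [1, 0]]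

def Spec_can_knight_reach_bottom (board : List (List Int)) (out : Bool) : Prop :=
  out = can_knight_reach_bottom_alt board
instance (board : List (List Int)) (out : Bool) :
    Decidable (Spec_can_knight_reach_bottom board out) := by
  unfold Spec_can_knight_reach_bottom; infer_instance

-- ===== CLAIM (what is proved, stated in full; the proofs are below) =====
def Claim_equal_can_knight_reach_bottom : Prop :=
  ∀ (board : List (List Int)), Dom_can_knight_reach_bottom board →
    Pre_can_knight_reach_bottom board →
    Spec_can_knight_reach_bottom board (can_knight_reach_bottom board)

-- ===== LEMMAS AND PROOFS =====

-- in-bounds for the N×N board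
def pvInB (board : List (List Int)) (x y : Int) : Prop :=
  0 ≤ x ∧ x < (board.length : Int) ∧ 0 ≤ y ∧ y < (board.length : Int)

-- admissible cell: in bounds and open (board value 0)
def pvAdm (board : List (List Int)) (x y : Int) : Prop :=
  pvInB board x y ∧ pvCell board x y = 0

-- knight reachability from the open top-row cells through open cells
inductive pvReach (board : List (List Int)) : Int → Int → Prop
  | start (j : Int) : pvAdm board 0 j → pvReach board 0 j
  | step (x y : Int) (mv : Int × Int) : pvReach board x y → mv ∈ pvMoves →
      pvAdm board (x + mv.1) (y + mv.2) → pvReach board (x + mv.1) (y + mv.2)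

-- the common goal
def pvGoal (board : List (List Int)) : Prop :=
  ∃ y, pvReach board ((board.length : Int) - 1) y

lemma pvReach_inB {board : List (List Int)} {x y : Int} (h : pvReach board x y) :
    pvInB board x y := by
  cases h with
  | start j ha => exact ha.1
  | step x y mv _ _ ha => exact ha.1

lemma pvOpen_iff_pvAdm (board : List (List Int)) (x y : Int) :
    pvOpen board x y = true ↔ pvAdm board x y := by
  unfold pvOpen pvAdm pvInB pvCell
  simp only [Bool.and_eq_true, decide_eq_true_eq, beq_iff_eq]
  constructor
  · rintro ⟨⟨⟨⟨h1, h2⟩, h3⟩, h4⟩, h6⟩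
    exact ⟨⟨h1, h2, h3, h4⟩, h6⟩
  · rintro ⟨⟨h1, h2, h3, h4⟩, h6⟩
    exact ⟨⟨⟨⟨h1, h2⟩, h3⟩, h4⟩, h6⟩

-- ===== B-side correctness =====

-- invariant of B's reach list
def pvInvB (board : List (List Int)) (R : List (Int × Int)) : Prop :=
  (∀ c ∈ R, pvReach board c.1 c.2 ∧ pvAdm board c.1 c.2) ∧ R.Nodup ∧
  (∀ j : Int, pvAdm board 0 j → ((0 : Int), j) ∈ R)

-- the reach list is closed under admissible knight moves
def pvClosedB (board : List (List Int)) (R : List (Int × Int)) : Prop :=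
  ∀ p ∈ R, ∀ mv ∈ pvMoves, pvAdm board (p.1 + mv.1) (p.2 + mv.2) →
    (p.1 + mv.1, p.2 + mv.2) ∈ R

lemma mem_pvNew {board : List (List Int)} {R : List (Int × Int)} {c : Int × Int}
    (h : c ∈ pvNew board R) :
    (∃ p ∈ R, ∃ mv ∈ pvMoves, c = (p.1 + mv.1, p.2 + mv.2)) ∧
      pvAdm board c.1 c.2 ∧ c ∉ R := by
  unfold pvNew at h
  simp only [List.mem_flatMap, List.mem_filterMap] at h
  obtain ⟨p, hp, mv, hmv, hif⟩ := h
  split_ifs at hif with hcond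
  · cases hif
    exact ⟨⟨p, hp, mv, hmv, rfl⟩, (pvOpen_iff_pvAdm board _ _).mp hcond.1, hcond.2⟩

lemma pvNew_nil_closed {board : List (List Int)} {R : List (Int × Int)}
    (h : pvNew board R = []) : pvClosedB board R := by
  intro p hp mv hmv hadm
  by_contra hnot
  have : (p.1 + mv.1, p.2 + mv.2) ∈ pvNew board R := by
    unfold pvNew
    simp only [List.mem_flatMap, List.mem_filterMap]
    exact ⟨p, hp, mv, hmv, by
      rw [if_pos ⟨(pvOpen_iff_pvAdm board _ _).mpr hadm, hnot⟩]⟩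
  rw [h] at this
  cases this

lemma pvAppendNew_subset {R new : List (Int × Int)} :
    ∀ x ∈ R, x ∈ pvAppendNew R new := by
  induction new generalizing R with
  | nil => intro x hx; exact hx
  | cons c cs ih =>
      intro x hx
      unfold pvAppendNew
      simp only [List.foldl_cons]
      by_cases hc : c ∈ R
      · rw [if_pos hc]; exact ih x hx
      · rw [if_neg hc]; exact ih x (List.mem_append_left _ hx)

lemma pvAppendNew_mem_elim {R new : List (Int × Int)} :
    ∀ x ∈ pvAppendNew R new, x ∈ R ∨ x ∈ new := by
  induction new generalizing R with
  | nil => intro x hx; exact Or.inl hx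
  | cons c cs ih =>
      intro x hx
      unfold pvAppendNew at hx
      simp only [List.foldl_cons] at hx
      by_cases hc : c ∈ R
      · rw [if_pos hc] at hx
        rcases ih x hx with h | h
        · exact Or.inl h
        · exact Or.inr (List.mem_cons_of_mem _ h)
      · rw [if_neg hc] at hx
        rcases ih x hx with h | h
        · rcases List.mem_append.mp h with h | h
          · exact Or.inl h
          · exact Or.inr (List.mem_cons.mpr (Or.inl (List.mem_singleton.mp h)))
        · exact Or.inr (List.mem_cons_of_mem _ h)

lemma pvAppendNew_nodup {R new : List (Int × Int)} (h : R.Nodup) :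
    (pvAppendNew R new).Nodup := by
  induction new generalizing R with
  | nil => exact h
  | cons c cs ih =>
      unfold pvAppendNew
      simp only [List.foldl_cons]
      by_cases hc : c ∈ R
      · rw [if_pos hc]; exact ih h
      · rw [if_neg hc]
        refine ih ?_
        simp only [List.nodup_append, h, true_and]
        refine ⟨List.nodup_singleton c, ?_⟩
        intro a ha b hb
        rw [List.mem_singleton] at hb
        subst hb
        exact fun e => hc (e ▸ ha)

lemma pvAppendNew_length_mono {R new : List (Int × Int)} :
    R.length ≤ (pvAppendNew R new).length := by
  induction new generalizing R with
  | nil => exact le_refl _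
  | cons c cs ih =>
      unfold pvAppendNew
      simp only [List.foldl_cons]
      by_cases hc : c ∈ R
      · rw [if_pos hc]; exact ih
      · rw [if_neg hc]
        calc R.length ≤ (R ++ [c]).length := by simp
          _ ≤ _ := ih

lemma pvAppendNew_length_lt {R new : List (Int × Int)} {c : Int × Int}
    (hc : c ∈ new) (hnc : c ∉ R) : R.length < (pvAppendNew R new).length := by
  induction new generalizing R with
  | nil => cases hc
  | cons d ds ih =>
      unfold pvAppendNew
      simp only [List.foldl_cons]
      rcases List.mem_cons.mp hc with rfl | hc'
      · rw [if_neg hnc]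
        calc R.length < (R ++ [c]).length := by simp
          _ ≤ _ := pvAppendNew_length_mono
      · by_cases hd : d ∈ R
        · rw [if_pos hd]; exact ih hc' hnc
        · rw [if_neg hd]
          by_cases hcd : c ∈ R ++ [d]
          · calc R.length < (R ++ [d]).length := by simp
              _ ≤ _ := pvAppendNew_length_mono
          · calc R.length < (R ++ [d]).length := by simp
              _ < _ := ih hc' hcd

lemma pvFull_closed {board : List (List Int)} {R : List (Int × Int)}
    (hnd : R.Nodup) (hin : ∀ c ∈ R, pvInB board c.1 c.2)
    (hlen : board.length * board.length ≤ R.length) :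
    ∀ x y, pvInB board x y → (x, y) ∈ R := by
  classical
  set N : Int := (board.length : Int) with hN
  set box : Finset (Int × Int) :=
    (Finset.Icc (0 : Int) (N - 1)) ×ˢ (Finset.Icc (0 : Int) (N - 1)) with hbox
  have hsub : R.toFinset ⊆ box := by
    intro c hc
    have := hin c (List.mem_toFinset.mp hc)
    unfold pvInB at this
    simp only [hbox, Finset.mem_product, Finset.mem_Icc]
    omega
  have hcardbox : box.card = board.length * board.length := by
    rw [hbox, Finset.card_product, Int.card_Icc]
    simp [hN]
  have heq : R.toFinset = box := by
    apply Finset.eq_of_subset_of_card_le hsub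
    rw [hcardbox]
    have := List.toFinset_card_of_nodup hnd
    omega
  intro x y hxy
  have : (x, y) ∈ box := by
    unfold pvInB at hxy
    simp only [hbox, Finset.mem_product, Finset.mem_Icc]
    omega
  rw [← heq] at this
  exact List.mem_toFinset.mp this

lemma pvBLoop_spec (board : List (List Int)) (fuel : Nat) (R : List (Int × Int))
    (hinv : pvInvB board R)
    (hfuel : board.length * board.length ≤ fuel + R.length) :
    pvInvB board (pvBLoop board fuel R) ∧ pvClosedB board (pvBLoop board fuel R) := by
  induction fuel generalizing R with
  | zero =>
      refine ⟨hinv, ?_⟩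
      intro p hp mv hmv hadm
      exact pvFull_closed hinv.2.1 (fun c hc => (hinv.1 c hc).2.1)
        (by omega) _ _ hadm.1
  | succ fuel ih =>
      show pvInvB board (pvBLoop board (fuel + 1) R) ∧ _
      rw [pvBLoop]
      by_cases hnew : pvNew board R = []
      · rw [if_pos hnew]
        exact ⟨hinv, pvNew_nil_closed hnew⟩
      · rw [if_neg hnew]
        obtain ⟨c, hc⟩ := List.exists_mem_of_ne_nil _ hnew
        have hcfacts := mem_pvNew hc
        have hinv' : pvInvB board (pvAppendNew R (pvNew board R)) := by
          refine ⟨?_, pvAppendNew_nodup hinv.2.1, ?_⟩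
          · intro d hd
            rcases pvAppendNew_mem_elim d hd with h | h
            · exact hinv.1 d h
            · obtain ⟨⟨p, hp, mv, hmv, rfl⟩, hadm, _⟩ := mem_pvNew h
              exact ⟨pvReach.step p.1 p.2 mv (hinv.1 p hp).1 hmv hadm, hadm⟩
          · intro j hj
            exact pvAppendNew_subset _ (hinv.2.2 j hj)
        have hlen : R.length < (pvAppendNew R (pvNew board R)).length :=
          pvAppendNew_length_lt hc hcfacts.2.2
        exact ih _ hinv' (by omega)

lemma pvReach_mem_of_closed {board : List (List Int)} {R : List (Int × Int)}
    (hstart : ∀ j : Int, pvAdm board 0 j → ((0 : Int), j) ∈ R)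
    (hclosed : pvClosedB board R) :
    ∀ x y, pvReach board x y → (x, y) ∈ R := by
  intro x y h
  induction h with
  | start j hj => exact hstart j hj
  | step x y mv hr hmv hadm ih => exact hclosed (x, y) ih mv hmv hadm

-- ===== A-side correctness =====

-- a visited-matrix cell counts as marked when it is non-zero
def pvMarked (v : List (List Int)) (x y : Int) : Prop := pvCell v x y ≠ 0

lemma pvCell_zero_lt {m : List (List Int)} {x y : Int} (h : pvCell m x y = 0) :
    x.toNat < m.length ∧ y.toNat < (m.getD x.toNat []).length := by
  unfold pvCell at h
  constructor
  · by_contra hi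
    rw [List.getD_eq_default m [] (Nat.le_of_not_lt hi)] at h
    simp [List.getD] at h
  · exact pvGetD_zero_lt _ _ h

lemma pvCell_pvSet {m : List (List Int)} {x y : Int} (x' y' : Int)
    (hi : x.toNat < m.length) (hj : y.toNat < (m.getD x.toNat []).length) :
    pvCell (pvSet m x y 1) x' y' =
      if x'.toNat = x.toNat ∧ y'.toNat = y.toNat then 1 else pvCell m x' y' := by
  unfold pvCell pvSet
  by_cases hx : x'.toNat = x.toNat
  · rw [hx]
    have hrow : (m.set x.toNat ((m.getD x.toNat []).set y.toNat 1)).getD x.toNat [] =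
        (m.getD x.toNat []).set y.toNat 1 := by
      rw [List.getD_eq_getElem?_getD (l := m.set x.toNat ((m.getD x.toNat []).set y.toNat 1)),
        List.getElem?_set_self (by simpa using hi)]
      rfl
    rw [hrow]
    by_cases hy : y'.toNat = y.toNat
    · rw [if_pos ⟨rfl, hy⟩, hy]
      rw [List.getD_eq_getElem?_getD (l := (m.getD x.toNat []).set y.toNat 1),
        List.getElem?_set_self hj]
      rfl
    · rw [if_neg (by tauto)]
      rw [List.getD_eq_getElem?_getD (l := (m.getD x.toNat []).set y.toNat 1),
        List.getElem?_set_ne (Ne.symm hy), ← List.getD_eq_getElem?_getD]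
  · rw [if_neg (by tauto)]
    have houter : (m.set x.toNat ((m.getD x.toNat []).set y.toNat 1)).getD x'.toNat [] =
        m.getD x'.toNat [] := by
      rw [List.getD_eq_getElem?_getD (l := m.set x.toNat ((m.getD x.toNat []).set y.toNat 1)),
        List.getElem?_set_ne (Ne.symm hx), ← List.getD_eq_getElem?_getD]
    rw [houter]

lemma pvMarked_pvSet_iff {m : List (List Int)} {x y : Int} (x' y' : Int)
    (hi : x.toNat < m.length) (hj : y.toNat < (m.getD x.toNat []).length) :
    pvMarked (pvSet m x y 1) x' y' ↔
      (x'.toNat = x.toNat ∧ y'.toNat = y.toNat) ∨ pvMarked m x' y' := by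
  unfold pvMarked
  rw [pvCell_pvSet x' y' hi hj]
  split_ifs with hcase
  · simp [hcase]
  · simp [hcase]

-- the invariant of A's DFS loop
def pvInvA (board : List (List Int)) (v : List (List Int)) (s : List (Int × Int)) : Prop :=
  (∀ x y, pvInB board x y → pvMarked v x y → pvReach board x y) ∧
  (∀ c ∈ s, pvInB board c.1 c.2 ∧ pvMarked v c.1 c.2) ∧
  (∀ j : Int, pvAdm board 0 j → pvMarked v 0 j) ∧
  (∀ x y, pvInB board x y → pvMarked v x y →
    (x, y) ∈ s ∨ (x ≠ (board.length : Int) - 1 ∧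
      ∀ mv ∈ pvMoves, pvAdm board (x + mv.1) (y + mv.2) → pvMarked v (x + mv.1) (y + mv.2)))

-- all the facts we need about one pass of A's inner move loop
lemma pvTry_foldl_facts (board : List (List Int)) (cx cy : Int)
    (hc : pvReach board cx cy) :
    ∀ (ms : List (Int × Int)), (∀ mv ∈ ms, mv ∈ pvMoves) →
    ∀ (v : List (List Int)) (s0 : List (Int × Int)),
    (∀ x y, pvMarked v x y →
        pvMarked (ms.foldl (pvTry board (board.length : Int) cx cy) (v, s0)).1 x y) ∧
    (∀ e ∈ s0, e ∈ (ms.foldl (pvTry board (board.length : Int) cx cy) (v, s0)).2) ∧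
    (∀ x y, pvInB board x y →
        pvMarked (ms.foldl (pvTry board (board.length : Int) cx cy) (v, s0)).1 x y →
        pvMarked v x y ∨ (pvReach board x y ∧ pvAdm board x y ∧
          (x, y) ∈ (ms.foldl (pvTry board (board.length : Int) cx cy) (v, s0)).2)) ∧
    (∀ e ∈ (ms.foldl (pvTry board (board.length : Int) cx cy) (v, s0)).2,
        e ∈ s0 ∨ (pvReach board e.1 e.2 ∧ pvAdm board e.1 e.2 ∧
          pvMarked (ms.foldl (pvTry board (board.length : Int) cx cy) (v, s0)).1 e.1 e.2)) ∧
    (∀ mv ∈ ms, pvAdm board (cx + mv.1) (cy + mv.2) →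
        pvMarked (ms.foldl (pvTry board (board.length : Int) cx cy) (v, s0)).1
          (cx + mv.1) (cy + mv.2)) := by
  intro ms
  induction ms with
  | nil =>
      intro _ v s0
      refine ⟨fun x y h => h, fun e he => he, fun x y _ h => Or.inl h,
        fun e he => Or.inl he, fun mv hmv => absurd hmv (List.not_mem_nil)⟩
  | cons mv ms ih =>
      intro hms v s0
      have hmv0 : mv ∈ pvMoves := hms mv List.mem_cons_self
      have hms' : ∀ m ∈ ms, m ∈ pvMoves := fun m hm => hms m (List.mem_cons_of_mem _ hm)
      simp only [List.foldl_cons]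
      by_cases hg : 0 ≤ cx + mv.1 ∧ cx + mv.1 < (board.length : Int) ∧ 0 ≤ cy + mv.2 ∧
          cy + mv.2 < (board.length : Int) ∧ pvCell board (cx + mv.1) (cy + mv.2) = 0 ∧
          pvCell v (cx + mv.1) (cy + mv.2) = 0
      · have hstep : pvTry board (board.length : Int) cx cy (v, s0) mv =
            (pvSet v (cx + mv.1) (cy + mv.2) 1, s0 ++ [(cx + mv.1, cy + mv.2)]) := by
          unfold pvTry
          simp only []
          rw [if_pos hg]
        rw [hstep]
        obtain ⟨h0, h1, h2, h3, h4, h5⟩ := hg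
        have hlt := pvCell_zero_lt h5
        have hmset := fun (x' y' : Int) => pvMarked_pvSet_iff x' y' hlt.1 hlt.2
        have hadm : pvAdm board (cx + mv.1) (cy + mv.2) := ⟨⟨h0, h1, h2, h3⟩, h4⟩
        have hreach : pvReach board (cx + mv.1) (cy + mv.2) :=
          pvReach.step cx cy mv hc hmv0 hadm
        obtain ⟨C1, C2, C3, C4, C5⟩ := ih hms' (pvSet v (cx + mv.1) (cy + mv.2) 1)
          (s0 ++ [(cx + mv.1, cy + mv.2)])
        refine ⟨?_, ?_, ?_, ?_, ?_⟩
        · intro x y h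
          exact C1 x y ((hmset x y).mpr (Or.inr h))
        · intro e he
          exact C2 e (List.mem_append_left _ he)
        · intro x y hxy h
          rcases C3 x y hxy h with h' | h'
          · rcases (hmset x y).mp h' with ⟨he1, he2⟩ | h''
            · have hx : x = cx + mv.1 := by
                have := hxy.1
                omega
              have hy : y = cy + mv.2 := by
                have := hxy.2.2.1
                omega
              subst hx; subst hy
              exact Or.inr ⟨hreach, hadm,
                C2 _ (List.mem_append_right _ (List.mem_singleton.mpr rfl))⟩
            · exact Or.inl h''
          · exact Or.inr h'
        · intro e he
          rcases C4 e he with h' | h'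
          · rcases List.mem_append.mp h' with h'' | h''
            · exact Or.inl h''
            · rw [List.mem_singleton] at h''
              subst h''
              exact Or.inr ⟨hreach, hadm, C1 _ _ ((hmset _ _).mpr (Or.inl ⟨rfl, rfl⟩))⟩
          · exact Or.inr h'
        · intro mv' hmv' hadm'
          rcases List.mem_cons.mp hmv' with rfl | hmv''
          · exact C1 _ _ ((hmset _ _).mpr (Or.inl ⟨rfl, rfl⟩))
          · exact C5 mv' hmv'' hadm'
      · have hstep : pvTry board (board.length : Int) cx cy (v, s0) mv = (v, s0) := by
          unfold pvTry
          simp only []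
          rw [if_neg hg]
        rw [hstep]
        obtain ⟨C1, C2, C3, C4, C5⟩ := ih hms' v s0
        refine ⟨C1, C2, C3, C4, ?_⟩
        · intro mv' hmv' hadm'
          rcases List.mem_cons.mp hmv' with rfl | hmv''
          · have hmarked : pvMarked v (cx + mv'.1) (cy + mv'.2) := by
              unfold pvMarked
              intro hzero
              exact hg ⟨hadm'.1.1, hadm'.1.2.1, hadm'.1.2.2.1, hadm'.1.2.2.2, hadm'.2, hzero⟩
            exact C1 _ _ hmarked
          · exact C5 mv' hmv'' hadm'

-- the key loop lemma: under the invariant, A's DFS answers exactly pvGoal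
lemma pvALoop_iff (board : List (List Int)) :
    ∀ (n : Nat) (v : List (List Int)) (s : List (Int × Int)),
      9 * pvU v + s.length ≤ n → pvInvA board v s →
      (pvALoop board (board.length : Int) v s = true ↔ pvGoal board) := by
  intro n
  induction n using Nat.strong_induction_on with
  | _ n ih =>
    intro v s hn hinv
    rw [pvALoop]
    by_cases hs : s = []
    · rw [dif_pos hs]
      subst hs
      simp only [Bool.false_eq_true, false_iff]
      rintro ⟨y, hy⟩
      have hmarked : ∀ x z, pvReach board x z → pvMarked v x z := by
        intro x z h
        induction h with
        | start j hj => exact hinv.2.2.1 j hj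
        | step x z mvv hr hmvv hadm ihr =>
            rcases hinv.2.2.2 x z (pvReach_inB hr) ihr with hmem | ⟨_, hcl⟩
            · cases hmem
            · exact hcl mvv hmvv hadm
      rcases hinv.2.2.2 _ y (pvReach_inB hy) (hmarked _ y hy) with hmem | ⟨hne, _⟩
      · cases hmem
      · exact hne rfl
    · rw [dif_neg hs]
      by_cases hlast : (s.getLast hs).1 = (board.length : Int) - 1
      · show (if (s.getLast hs).1 = (board.length : Int) - 1 then true
            else pvALoop board (board.length : Int)
              (pvMoves.foldl (pvTry board (board.length : Int)
                (s.getLast hs).1 (s.getLast hs).2) (v, s.dropLast)).1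
              (pvMoves.foldl (pvTry board (board.length : Int)
                (s.getLast hs).1 (s.getLast hs).2) (v, s.dropLast)).2) = true ↔ pvGoal board
        rw [if_pos hlast]
        simp only [true_iff]
        have hmem : s.getLast hs ∈ s := List.getLast_mem hs
        obtain ⟨hInB, hmk⟩ := hinv.2.1 _ hmem
        have hreach := hinv.1 _ _ hInB hmk
        exact ⟨(s.getLast hs).2, hlast ▸ hreach⟩
      · show (if (s.getLast hs).1 = (board.length : Int) - 1 then true
            else pvALoop board (board.length : Int)
              (pvMoves.foldl (pvTry board (board.length : Int)
                (s.getLast hs).1 (s.getLast hs).2) (v, s.dropLast)).1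
              (pvMoves.foldl (pvTry board (board.length : Int)
                (s.getLast hs).1 (s.getLast hs).2) (v, s.dropLast)).2) = true ↔ pvGoal board
        rw [if_neg hlast]
        have hmem : s.getLast hs ∈ s := List.getLast_mem hs
        obtain ⟨hInBc, hmkc⟩ := hinv.2.1 _ hmem
        have hreachc := hinv.1 _ _ hInBc hmkc
        obtain ⟨C1, C2, C3, C4, C5⟩ :=
          pvTry_foldl_facts board (s.getLast hs).1 (s.getLast hs).2 hreachc pvMoves
            (fun _ h => h) v s.dropLast
        have hsplit : ∀ e : Int × Int, e ∈ s → e ∈ s.dropLast ∨ e = s.getLast hs := by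
          intro e he
          conv at he => rw [← List.dropLast_concat_getLast hs]
          rcases List.mem_append.mp he with h | h
          · exact Or.inl h
          · exact Or.inr (List.mem_singleton.mp h)
        have hmeas := pvTry_foldl_measure board (board.length : Int)
          (s.getLast hs).1 (s.getLast hs).2 pvMoves (v, s.dropLast)
        have hslen : 0 < s.length := List.length_pos_iff.mpr hs
        have hdrop : s.dropLast.length = s.length - 1 := List.length_dropLast
        apply ih (9 * pvU (pvMoves.foldl (pvTry board (board.length : Int)
            (s.getLast hs).1 (s.getLast hs).2) (v, s.dropLast)).1 +
          (pvMoves.foldl (pvTry board (board.length : Int)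
            (s.getLast hs).1 (s.getLast hs).2) (v, s.dropLast)).2.length)
          (by simp only at hmeas ⊢; omega) _ _ (le_refl _)
        refine ⟨?_, ?_, ?_, ?_⟩
        · intro x y hxy hmk
          rcases C3 x y hxy hmk with h | h
          · exact hinv.1 x y hxy h
          · exact h.1
        · intro e he
          rcases C4 e he with h | h
          · obtain ⟨hi, hm⟩ := hinv.2.1 e (List.mem_of_mem_dropLast h)
            exact ⟨hi, C1 _ _ hm⟩
          · exact ⟨h.2.1.1, h.2.2⟩
        · intro j hj
          exact C1 _ _ (hinv.2.2.1 j hj)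
        · intro x y hxy hmk
          rcases C3 x y hxy hmk with h | h
          · rcases hinv.2.2.2 x y hxy h with hmem' | ⟨hne, hcl⟩
            · rcases hsplit _ hmem' with h' | h'
              · exact Or.inl (C2 _ h')
              · have hx : x = (s.getLast hs).1 := by rw [← h']
                have hy : y = (s.getLast hs).2 := by rw [← h']
                subst hx; subst hy
                exact Or.inr ⟨hlast, fun mv hmv hadm => C5 mv hmv hadm⟩
            · exact Or.inr ⟨hne, fun mv hmv hadm => C1 _ _ (hcl mv hmv hadm)⟩
          · exact Or.inl h.2.2

-- the initial visited matrix is all zeros inside the board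
lemma pvCell_visited0 (board : List (List Int)) (x y : Int) (hxy : pvInB board x y) :
    pvCell ((List.range board.length).map
      (fun _ => (List.range board.length).map (fun _ => (0 : Int)))) x y = 0 := by
  obtain ⟨h0, h1, h2, h3⟩ := hxy
  unfold pvCell
  have hx : x.toNat < board.length := by omega
  have hy : y.toNat < board.length := by omega
  simp [List.getD_eq_getElem?_getD, hx, hy]

lemma pvGetD_set_zero (v : List (List Int)) (r : List Int) (h : 0 < v.length) :
    (v.set 0 r).getD 0 [] = r := by
  rw [List.getD_eq_getElem?_getD (l := v.set 0 r), List.getElem?_set_self h]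
  rfl

-- all the facts we need about A's start loop
lemma pvInit_foldl_facts (board : List (List Int)) :
    ∀ (js : List Nat), (∀ j ∈ js, (j : Int) < (board.length : Int)) →
    ∀ (v : List (List Int)) (s0 : List (Int × Int)),
    (0 < board.length → 0 < v.length ∧ board.length ≤ (v.getD 0 []).length) →
    (∀ x y, pvMarked v x y → pvMarked (js.foldl (pvInit board) (v, s0)).1 x y) ∧
    (∀ x y, pvInB board x y → pvMarked (js.foldl (pvInit board) (v, s0)).1 x y →
        pvMarked v x y ∨ (pvReach board x y ∧ pvAdm board x y ∧
          (x, y) ∈ (js.foldl (pvInit board) (v, s0)).2)) ∧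
    (∀ e ∈ (js.foldl (pvInit board) (v, s0)).2,
        e ∈ s0 ∨ (pvReach board e.1 e.2 ∧ pvAdm board e.1 e.2 ∧
          pvMarked (js.foldl (pvInit board) (v, s0)).1 e.1 e.2)) ∧
    (∀ j ∈ js, pvCell board 0 (j : Int) = 0 →
        pvMarked (js.foldl (pvInit board) (v, s0)).1 0 (j : Int)) ∧
    (∀ e ∈ s0, e ∈ (js.foldl (pvInit board) (v, s0)).2) := by
  intro js
  induction js with
  | nil =>
      intro _ v s0 _
      exact ⟨fun x y h => h, fun x y _ h => Or.inl h, fun e he => Or.inl he,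
        fun j hj => absurd hj (List.not_mem_nil), fun e he => he⟩
  | cons j js ih =>
      intro hjs v s0 hsh
      have hj0 : (j : Int) < (board.length : Int) := hjs j List.mem_cons_self
      have hjs' : ∀ m ∈ js, (m : Int) < (board.length : Int) :=
        fun m hm => hjs m (List.mem_cons_of_mem _ hm)
      have hpos : 0 < board.length := by omega
      obtain ⟨hv0, hrow0⟩ := hsh hpos
      simp only [List.foldl_cons]
      by_cases hg : pvCell board 0 (j : Int) = 0
      · have hstep : pvInit board (v, s0) j =
            (pvSet v 0 (j : Int) 1, s0 ++ [((0 : Int), (j : Int))]) := by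
          unfold pvInit
          rw [if_pos hg]
        rw [hstep]
        have hi : (0 : Int).toNat < v.length := by simpa using hv0
        have hjn : ((j : Int)).toNat < (v.getD (0 : Int).toNat []).length := by
          simp only [Int.toNat_natCast, Int.toNat_zero]
          omega
        have hmset := fun (x' y' : Int) => pvMarked_pvSet_iff x' y' hi hjn
        have hadm : pvAdm board 0 (j : Int) :=
          ⟨⟨le_refl 0, by exact_mod_cast Nat.cast_pos.mpr hpos, by positivity, hj0⟩, hg⟩
        have hreach : pvReach board 0 (j : Int) := pvReach.start _ hadm
        have hsh' : 0 < board.length → 0 < (pvSet v 0 (j : Int) 1).length ∧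
            board.length ≤ ((pvSet v 0 (j : Int) 1).getD 0 []).length := by
          intro _
          unfold pvSet
          constructor
          · simpa using hv0
          · simp only [Int.toNat_zero]
            rw [pvGetD_set_zero v _ hv0]
            simpa using hrow0
        obtain ⟨C1, C3, C4, C5, C2⟩ := ih hjs' (pvSet v 0 (j : Int) 1)
          (s0 ++ [((0 : Int), (j : Int))]) hsh'
        refine ⟨?_, ?_, ?_, ?_, ?_⟩
        · intro x y h
          exact C1 x y ((hmset x y).mpr (Or.inr h))
        · intro x y hxy h
          rcases C3 x y hxy h with h' | h'
          · rcases (hmset x y).mp h' with ⟨he1, he2⟩ | h''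
            · have hx : x = 0 := by
                have := hxy.1
                simp only [Int.toNat_zero] at he1
                omega
              have hy : y = (j : Int) := by
                have := hxy.2.2.1
                simp only [Int.toNat_natCast] at he2
                omega
              subst hx; subst hy
              exact Or.inr ⟨hreach, hadm,
                C2 _ (List.mem_append_right _ (List.mem_singleton.mpr rfl))⟩
            · exact Or.inl h''
          · exact Or.inr h'
        · intro e he
          rcases C4 e he with h' | h'
          · rcases List.mem_append.mp h' with h'' | h''
            · exact Or.inl h''
            · rw [List.mem_singleton] at h''
              subst h''
              exact Or.inr ⟨hreach, hadm, C1 _ _ ((hmset _ _).mpr (Or.inl ⟨rfl, rfl⟩))⟩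
          · exact Or.inr h'
        · intro j' hj' hcell
          rcases List.mem_cons.mp hj' with rfl | hj''
          · exact C1 _ _ ((hmset _ _).mpr (Or.inl ⟨rfl, rfl⟩))
          · exact C5 j' hj'' hcell
        · intro e he
          exact C2 e (List.mem_append_left _ he)
      · have hstep : pvInit board (v, s0) j = (v, s0) := by
          unfold pvInit
          rw [if_neg hg]
        rw [hstep]
        obtain ⟨C1, C3, C4, C5, C2⟩ := ih hjs' v s0 hsh
        refine ⟨C1, C3, C4, ?_, C2⟩
        intro j' hj' hcell
        rcases List.mem_cons.mp hj' with rfl | hj''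
        · exact absurd hcell hg
        · exact C5 j' hj'' hcell

theorem can_knight_reach_bottom_A_iff (board : List (List Int)) :
    can_knight_reach_bottom board = true ↔ pvGoal board := by
  unfold can_knight_reach_bottom
  simp only []
  set v0 := (List.range board.length).map
    (fun _ => (List.range board.length).map (fun _ => (0 : Int))) with hv0
  have hsh : 0 < board.length → 0 < v0.length ∧ board.length ≤ (v0.getD 0 []).length := by
    intro hpos
    constructor
    · simpa [hv0] using hpos
    · rw [hv0, List.getD_eq_getElem _ _ (by simpa using hpos)]
      simp
  obtain ⟨C1, C3, C4, C5, C2⟩ := pvInit_foldl_facts board (List.range board.length)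
    (fun j hj => by exact_mod_cast List.mem_range.mp hj) v0 [] hsh
  apply pvALoop_iff board _ _ _ (le_refl _)
  refine ⟨?_, ?_, ?_, ?_⟩
  · intro x y hxy hmk
    rcases C3 x y hxy hmk with h | h
    · exact absurd (pvCell_visited0 board x y hxy) h
    · exact h.1
  · intro e he
    rcases C4 e he with h | h
    · cases h
    · exact ⟨h.2.1.1, h.2.2⟩
  · intro j hj
    have hjs : j.toNat ∈ List.range board.length := by
      have h1 := hj.1.2.2.1
      have h2 := hj.1.2.2.2
      rw [List.mem_range]
      omega
    have hjj : ((j.toNat : Nat) : Int) = j := by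
      have := hj.1.2.2.1
      omega
    have := C5 j.toNat hjs (by rw [hjj]; exact hj.2)
    rwa [hjj] at this
  · intro x y hxy hmk
    rcases C3 x y hxy hmk with h | h
    · exact absurd (pvCell_visited0 board x y hxy) h
    · exact Or.inl h.2.2

lemma pvR0_inv (board : List (List Int)) :
    pvInvB board ((List.range board.length).filterMap
      (fun (j : Nat) => if pvOpen board 0 (j : Int) then some ((0 : Int), (j : Int)) else none)) := by
  refine ⟨?_, ?_, ?_⟩
  · intro c hc
    rw [List.mem_filterMap] at hc
    obtain ⟨j, _, hif⟩ := hc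
    split_ifs at hif with hopen
    cases hif
    have hadm := (pvOpen_iff_pvAdm board 0 (j : Int)).mp hopen
    exact ⟨pvReach.start _ hadm, hadm⟩
  · have key : ∀ (l : List Nat), l.Nodup →
        (l.filterMap (fun (j : Nat) =>
          if pvOpen board 0 (j : Int) then some ((0 : Int), (j : Int)) else none)).Nodup := by
      intro l hl
      refine List.Nodup.filterMap ?_ hl
      intro a a' b hb hb'
      simp only [Option.mem_def] at hb hb'
      split_ifs at hb hb' <;> simp_all
      rw [Prod.mk.injEq] at hb hb'
      have := hb.2.trans hb'.2.symm
      exact_mod_cast this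
    exact key _ List.nodup_range
  · intro j hj
    rw [List.mem_filterMap]
    have h0 : 0 ≤ j ∧ j < (board.length : Int) := ⟨hj.1.2.2.1, hj.1.2.2.2⟩
    have hjj : ((j.toNat : Nat) : Int) = j := by omega
    have hmem : j.toNat < board.length := by omega
    refine ⟨j.toNat, List.mem_range.mpr hmem, ?_⟩
    rw [hjj, if_pos ((pvOpen_iff_pvAdm board 0 j).mpr hj)]

theorem can_knight_reach_bottom_B_iff (board : List (List Int)) :
    can_knight_reach_bottom_alt board = true ↔ pvGoal board := by
  unfold can_knight_reach_bottom_alt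
  simp only []
  set R0 := (List.range board.length).filterMap
    (fun (j : Nat) => if pvOpen board 0 (j : Int) then some ((0 : Int), (j : Int)) else none) with hR0
  obtain ⟨hinv, hclosed⟩ :=
    pvBLoop_spec board (board.length * board.length) R0 (pvR0_inv board) (by omega)
  set r := pvBLoop board (board.length * board.length) R0 with hr
  rw [List.any_eq_true]
  constructor
  · rintro ⟨c, hc, hc1⟩
    rw [beq_iff_eq] at hc1
    have := (hinv.1 c hc).1
    exact ⟨c.2, by rw [← hc1]; exact this⟩
  · rintro ⟨y, hy⟩
    refine ⟨((board.length : Int) - 1, y), ?_, by simp⟩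
    exact pvReach_mem_of_closed hinv.2.2 hclosed _ _ hy

-- ===== VERDICT (by name: the statement is the Claim_ definition above) =====
theorem can_knight_reach_bottom_spec : Claim_equal_can_knight_reach_bottom := by
  intro board _ _
  unfold Spec_can_knight_reach_bottom
  rw [Bool.eq_iff_iff, can_knight_reach_bottom_A_iff, can_knight_reach_bottom_B_iff]
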